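-- pv_equiv track=rewrite | github.com/fabiogallotti/adventofcode | src/year2025/day06/functions.py | part_1
-- ===== SOURCE A (Python) =====
-- def preprocessing(data):
--     list_numbers = []
--     operations = [elem for elem in data[-1].split(" ") if elem]
--
--     for elem in data[:-1]:
--         numbers = elem.split(" ")
--         list_numbers.append([int(num) for num in numbers if num])
--
--     vertical_list = list(zip(*list_numbers))
--
--     return vertical_list, operations
--
-- def part_1(data):
--     list_numbers, operations = preprocessing(data)
--     list_total = []
--     for i in range(len(list_numbers)):
--         if operations[i] == "+":
--             list_total.append(sum(list_numbers[i]))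
--         elif operations[i] == "*":
--             product = 1
--             for num in list_numbers[i]:
--                 product *= num
--             list_total.append(product)
--
--     return sum(list_total)
-- ===== SOURCE B (Python) =====
-- def part_1(data):
--     operations = [t for t in data[-1].split(" ") if t]
--     rows = [[int(t) for t in line.split(" ") if t] for line in data[:-1]]
--     if not rows:
--         return 0
--     ncols = min(len(r) for r in rows)
--     cols = []  # (column index, operator) for the kept columns
--     acc = []   # per-column accumulator, aligned with cols
--     for i in range(ncols):
--         op = operations[i]
--         if op == "+":
--             cols.append((i, op))
--             acc.append(0)
--         elif op == "*":
--             cols.append((i, op))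
--             acc.append(1)
--     for row in rows:
--         acc = [a + row[i] if op == "+" else a * row[i] for (i, op), a in zip(cols, acc)]
--     return sum(acc)
-- ===== Notes on version B (the rewrite author's own statement) =====
-- stated objective: alternative
-- what changed: Replaces the column-major transpose (zip(*rows)) and per-column sum/product passes by a single row-major pass that folds each row's values into per-column accumulators initialised to 0 for '+' and 1 for '*'; no transposed structure is ever built.
import Mathlib
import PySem

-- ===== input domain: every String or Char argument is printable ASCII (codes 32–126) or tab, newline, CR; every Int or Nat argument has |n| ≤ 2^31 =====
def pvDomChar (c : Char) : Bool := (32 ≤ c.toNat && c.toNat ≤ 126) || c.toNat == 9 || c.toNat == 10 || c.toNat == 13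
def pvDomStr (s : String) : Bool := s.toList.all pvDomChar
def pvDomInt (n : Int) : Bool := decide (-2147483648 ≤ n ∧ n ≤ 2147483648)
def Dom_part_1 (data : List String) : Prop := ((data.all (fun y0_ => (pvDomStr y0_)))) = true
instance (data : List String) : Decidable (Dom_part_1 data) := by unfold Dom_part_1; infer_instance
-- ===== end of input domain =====

-- B replaces A's transpose (zip(*rows)) plus per-column sum/product passes by one
-- row-major pass folding each row into per-column accumulators (0 for '+', 1 for '*');
-- objective: alternative decomposition, same asymptotic cost.

-- ===== PORT A =====
-- tokens of `s.split(" ")` with empty strings filtered out (shared tokenizer helper)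
def pvTokens (s : String) : List String :=
  ((PySem.Str.split? s " ").getD []).filter (fun t => t ≠ "")

-- int(t); default 0 is never reached under Pre_ (Python raises ValueError there)
def pvParse (t : String) : Int := (PySem.Int.ofStr? t).getD 0

-- [int(num) for num in elem.split(" ") if num]
def pvRowA (line : String) : List Int := (pvTokens line).map pvParse

-- list(zip(*rows)): columns 0 ≤ i < min row length (empty when there are no rows)
def pyZipStar (rows : List (List Int)) : List (List Int) :=
  match rows with
  | [] => []
  | r :: _ =>
      (List.range (rows.foldl (fun m row => min m row.length) r.length)).map
        (fun i => rows.map (fun row => row.getD i 0))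

def part_1 (data : List String) : Int :=
  let operations := pvTokens (PySem.List.pyGetD data (-1) "")
  let list_numbers := (PySem.List.slice data none (some (-1))).map pvRowA
  let vertical := pyZipStar list_numbers
  let list_total := (List.range vertical.length).foldl
    (fun acc (i : Nat) =>
      if PySem.List.pyGetD operations (i : Int) "" = "+" then
        acc ++ [(vertical.getD i []).sum]
      else if PySem.List.pyGetD operations (i : Int) "" = "*" then
        acc ++ [(vertical.getD i []).foldl (fun product num => product * num) 1]
      else acc) []
  list_total.sum

-- ===== PORT B =====
def part_1_alt (data : List String) : Int :=
  let operations := pvTokens (PySem.List.pyGetD data (-1) "")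
  let rows := (PySem.List.slice data none (some (-1))).map pvRowA
  if rows = [] then 0
  else
    let ncols := match rows.map List.length with
      | [] => 0
      | l :: ls => ls.foldl min l
    let colsAcc := (List.range ncols).foldl
      (fun (ca : List (Nat × String) × List Int) (i : Nat) =>
        if PySem.List.pyGetD operations (i : Int) "" = "+" then
          (ca.1 ++ [(i, PySem.List.pyGetD operations (i : Int) "")], ca.2 ++ [0])
        else if PySem.List.pyGetD operations (i : Int) "" = "*" then
          (ca.1 ++ [(i, PySem.List.pyGetD operations (i : Int) "")], ca.2 ++ [1])
        else ca) ([], [])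
    let acc := rows.foldl
      (fun acc row =>
        (colsAcc.1.zip acc).map
          (fun p => if p.1.2 = "+" then p.2 + row.getD p.1.1 0 else p.2 * row.getD p.1.1 0))
      colsAcc.2
    acc.sum

-- ===== PRECONDITION & SPEC =====
-- Pre_ excludes exactly the inputs where A raises: empty data (IndexError on data[-1]),
-- a non-integer token in a numeric line (ValueError), or more columns than operators
-- (IndexError on operations[i]).
def Pre_part_1 (data : List String) : Prop :=
  data ≠ [] ∧
  (∀ line ∈ data.dropLast, ∀ t ∈ pvTokens line, (PySem.Int.ofStr? t).isSome = true) ∧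
  (data.dropLast ≠ [] →
    ∃ line ∈ data.dropLast,
      (pvTokens line).length ≤ (pvTokens (PySem.List.pyGetD data (-1) "")).length)
instance (data : List String) : Decidable (Pre_part_1 data) := by
  unfold Pre_part_1; infer_instance

def pvWitness_part_1 : List String := ["1 2 5", "3 4 6", "+ * -"]

def Spec_part_1 (data : List String) (out : Int) : Prop := out = part_1_alt data
instance (data : List String) (out : Int) : Decidable (Spec_part_1 data out) := by
  unfold Spec_part_1; infer_instance

-- ===== CLAIM (what is proved, stated in full; the proofs are below) =====
def Claim_equal_part_1 : Prop :=
  ∀ (data : List String), Dom_part_1 data → Pre_part_1 data → Spec_part_1 data (part_1 data)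

-- ===== LEMMAS AND PROOFS =====

-- per-column contribution both programs compute (proof-only abbreviation)
def pvContrib (operations : List String) (rows : List (List Int)) (i : Nat) : Int :=
  if PySem.List.pyGetD operations (i : Int) "" = "+" then
    (rows.map (fun row => row.getD i 0)).sum
  else if PySem.List.pyGetD operations (i : Int) "" = "*" then
    (rows.map (fun row => row.getD i 0)).prod
  else 0

-- appending loop = flatMap
theorem pv_foldl_append {α β : Type} (h : β → List α) (l : List β) (acc0 : List α) :
    l.foldl (fun acc i => acc ++ h i) acc0 = acc0 ++ l.flatMap h := by
  induction l generalizing acc0 with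
  | nil => simp
  | cons x xs ih => simp [List.foldl_cons, ih]

-- pairwise appending loop = pair of flatMaps
theorem pv_foldl_append_pair {α β γ : Type} (hc : β → List α) (ha : β → List γ)
    (l : List β) (c0 : List α) (a0 : List γ) :
    l.foldl (fun ca i => (ca.1 ++ hc i, ca.2 ++ ha i)) (c0, a0)
      = (c0 ++ l.flatMap hc, a0 ++ l.flatMap ha) := by
  induction l generalizing c0 a0 with
  | nil => simp
  | cons x xs ih => simp [List.foldl_cons, ih]

theorem pv_zip_map {α β : Type} (l : List α) (g : α → β) :
    l.zip (l.map g) = l.map (fun x => (x, g x)) := by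
  induction l with
  | nil => rfl
  | cons x xs ih => simp [ih]

theorem pv_sum_flatMap {β : Type} (l : List β) (h : β → List Int) :
    (l.flatMap h).sum = (l.map (fun i => (h i).sum)).sum := by
  induction l with
  | nil => rfl
  | cons x xs ih => simp [ih]

theorem pv_foldl_add (rows : List (List Int)) (f : List Int → Int) (c : Int) :
    rows.foldl (fun a row => a + f row) c = c + (rows.map f).sum := by
  induction rows generalizing c with
  | nil => simp
  | cons r rs ih => simp [ih]; ring

theorem pv_foldl_mul (l : List Int) (c : Int) :
    l.foldl (fun a x => a * x) c = c * l.prod := by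
  induction l generalizing c with
  | nil => simp
  | cons x xs ih => simp [ih]; ring

theorem pv_foldl_mul_map (rows : List (List Int)) (f : List Int → Int) (c : Int) :
    rows.foldl (fun a row => a * f row) c = c * (rows.map f).prod := by
  induction rows generalizing c with
  | nil => simp
  | cons r rs ih => simp [ih]; ring

-- the per-column state of B's row fold, one column at a time
theorem pv_foldl_cols (cols : List (Nat × String)) (rows : List (List Int))
    (g : Nat × String → Int) :
    rows.foldl
      (fun acc row =>
        (cols.zip acc).map
          (fun p => if p.1.2 = "+" then p.2 + row.getD p.1.1 0 else p.2 * row.getD p.1.1 0))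
      (cols.map g)
    = cols.map (fun c => rows.foldl
        (fun a row => if c.2 = "+" then a + row.getD c.1 0 else a * row.getD c.1 0) (g c)) := by
  induction rows generalizing g with
  | nil => rfl
  | cons r rs ih =>
      simp only [List.foldl_cons, pv_zip_map, List.map_map]
      exact ih _

-- A's loop computes the sum of per-column contributions
theorem pv_A_loop (operations : List String) (vertical : List (List Int)) :
    ((List.range vertical.length).foldl
      (fun acc (i : Nat) =>
        if PySem.List.pyGetD operations (i : Int) "" = "+" then
          acc ++ [(vertical.getD i []).sum]
        else if PySem.List.pyGetD operations (i : Int) "" = "*" then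
          acc ++ [(vertical.getD i []).foldl (fun product num => product * num) 1]
        else acc) []).sum
    = ((List.range vertical.length).map
        (fun (i : Nat) =>
          if PySem.List.pyGetD operations (i : Int) "" = "+" then (vertical.getD i []).sum
          else if PySem.List.pyGetD operations (i : Int) "" = "*" then
            (vertical.getD i []).foldl (fun product num => product * num) 1
          else 0)).sum := by
  have hfun : (fun (acc : List Int) (i : Nat) =>
      if PySem.List.pyGetD operations (i : Int) "" = "+" then acc ++ [(vertical.getD i []).sum]
      else if PySem.List.pyGetD operations (i : Int) "" = "*" then
        acc ++ [(vertical.getD i []).foldl (fun product num => product * num) 1]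
      else acc)
      = (fun (acc : List Int) (i : Nat) => acc ++
          (if PySem.List.pyGetD operations (i : Int) "" = "+" then [(vertical.getD i []).sum]
           else if PySem.List.pyGetD operations (i : Int) "" = "*" then
             [(vertical.getD i []).foldl (fun product num => product * num) 1]
           else [])) := by
    funext acc i; split_ifs <;> simp
  rw [hfun, pv_foldl_append, List.nil_append, pv_sum_flatMap]
  congr 1
  apply List.map_congr_left
  intro i _
  split_ifs <;> simp

-- B's two loops compute the same sum of per-column contributions
theorem pv_B_loop (operations : List String) (rows : List (List Int)) (n : Nat) :
    (rows.foldl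
      (fun acc row =>
        ((((List.range n).foldl
            (fun (ca : List (Nat × String) × List Int) (i : Nat) =>
              if PySem.List.pyGetD operations (i : Int) "" = "+" then
                (ca.1 ++ [(i, PySem.List.pyGetD operations (i : Int) "")], ca.2 ++ [0])
              else if PySem.List.pyGetD operations (i : Int) "" = "*" then
                (ca.1 ++ [(i, PySem.List.pyGetD operations (i : Int) "")], ca.2 ++ [1])
              else ca) ([], [])).1).zip acc).map
          (fun p => if p.1.2 = "+" then p.2 + row.getD p.1.1 0 else p.2 * row.getD p.1.1 0))
      ((List.range n).foldl
        (fun (ca : List (Nat × String) × List Int) (i : Nat) =>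
          if PySem.List.pyGetD operations (i : Int) "" = "+" then
            (ca.1 ++ [(i, PySem.List.pyGetD operations (i : Int) "")], ca.2 ++ [0])
          else if PySem.List.pyGetD operations (i : Int) "" = "*" then
            (ca.1 ++ [(i, PySem.List.pyGetD operations (i : Int) "")], ca.2 ++ [1])
          else ca) ([], [])).2).sum
    = ((List.range n).map (pvContrib operations rows)).sum := by
  have hfun : (fun (ca : List (Nat × String) × List Int) (i : Nat) =>
      if PySem.List.pyGetD operations (i : Int) "" = "+" then
        (ca.1 ++ [(i, PySem.List.pyGetD operations (i : Int) "")], ca.2 ++ [0])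
      else if PySem.List.pyGetD operations (i : Int) "" = "*" then
        (ca.1 ++ [(i, PySem.List.pyGetD operations (i : Int) "")], ca.2 ++ [1])
      else ca)
      = (fun (ca : List (Nat × String) × List Int) (i : Nat) => (ca.1 ++
          (if PySem.List.pyGetD operations (i : Int) "" = "+" then
            [(i, PySem.List.pyGetD operations (i : Int) "")]
           else if PySem.List.pyGetD operations (i : Int) "" = "*" then
            [(i, PySem.List.pyGetD operations (i : Int) "")]
           else []),
          ca.2 ++
          (if PySem.List.pyGetD operations (i : Int) "" = "+" then ([0] : List Int)
           else if PySem.List.pyGetD operations (i : Int) "" = "*" then [1]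
           else []))) := by
    funext ca i; split_ifs <;> simp
  rw [hfun, pv_foldl_append_pair]
  simp only [List.nil_append]
  have hinit : ((List.range n).flatMap
      (fun (i : Nat) => if PySem.List.pyGetD operations (i : Int) "" = "+" then ([0] : List Int)
        else if PySem.List.pyGetD operations (i : Int) "" = "*" then [1] else []))
      = ((List.range n).flatMap
          (fun (i : Nat) => if PySem.List.pyGetD operations (i : Int) "" = "+" then
              [(i, PySem.List.pyGetD operations (i : Int) "")]
            else if PySem.List.pyGetD operations (i : Int) "" = "*" then
              [(i, PySem.List.pyGetD operations (i : Int) "")]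
            else [])).map (fun c => if c.2 = "+" then (0 : Int) else 1) := by
    rw [List.map_flatMap]
    apply List.flatMap_congr
    intro i _
    split_ifs <;> simp_all
  rw [hinit, pv_foldl_cols, List.map_flatMap, pv_sum_flatMap]
  congr 1
  apply List.map_congr_left
  intro i _
  by_cases h1 : PySem.List.pyGetD operations (i : Int) "" = "+"
  · simp [pvContrib, h1, pv_foldl_add]
  · by_cases h2 : PySem.List.pyGetD operations (i : Int) "" = "*"
    · simp [pvContrib, h2, pv_foldl_mul_map]
    · simp only [PySem.List.pyGetD_natCast, List.getD_eq_getElem?_getD] at h1 h2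
      simp [pvContrib, h1, h2]

theorem pv_core (operations : List String) (rows : List (List Int)) :
    ((List.range (pyZipStar rows).length).foldl
      (fun acc (i : Nat) =>
        if PySem.List.pyGetD operations (i : Int) "" = "+" then
          acc ++ [((pyZipStar rows).getD i []).sum]
        else if PySem.List.pyGetD operations (i : Int) "" = "*" then
          acc ++ [((pyZipStar rows).getD i []).foldl (fun product num => product * num) 1]
        else acc) []).sum
    = (if rows = [] then (0 : Int)
       else
        (rows.foldl
          (fun acc row =>
            ((((List.range (match rows.map List.length with
                  | [] => 0 | l :: ls => ls.foldl min l)).foldl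
                (fun (ca : List (Nat × String) × List Int) (i : Nat) =>
                  if PySem.List.pyGetD operations (i : Int) "" = "+" then
                    (ca.1 ++ [(i, PySem.List.pyGetD operations (i : Int) "")], ca.2 ++ [0])
                  else if PySem.List.pyGetD operations (i : Int) "" = "*" then
                    (ca.1 ++ [(i, PySem.List.pyGetD operations (i : Int) "")], ca.2 ++ [1])
                  else ca) ([], [])).1).zip acc).map
              (fun p => if p.1.2 = "+" then p.2 + row.getD p.1.1 0 else p.2 * row.getD p.1.1 0))
          ((List.range (match rows.map List.length with
              | [] => 0 | l :: ls => ls.foldl min l)).foldl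
            (fun (ca : List (Nat × String) × List Int) (i : Nat) =>
              if PySem.List.pyGetD operations (i : Int) "" = "+" then
                (ca.1 ++ [(i, PySem.List.pyGetD operations (i : Int) "")], ca.2 ++ [0])
              else if PySem.List.pyGetD operations (i : Int) "" = "*" then
                (ca.1 ++ [(i, PySem.List.pyGetD operations (i : Int) "")], ca.2 ++ [1])
              else ca) ([], [])).2).sum) := by
  cases rows with
  | nil => simp [pyZipStar]
  | cons r rs =>
      rw [if_neg (by simp : ¬(r :: rs = ([] : List (List Int))))]
      rw [pv_B_loop]
      rw [pv_A_loop]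
      have hn : (match (r :: rs).map List.length with
          | [] => (0 : Nat) | l :: ls => ls.foldl min l)
          = (r :: rs).foldl (fun m row => min m row.length) r.length := by
        simp [List.foldl_cons, List.foldl_map]
      rw [hn]
      simp only [pyZipStar, List.length_map, List.length_range]
      congr 1
      apply List.map_congr_left
      intro i hi
      rw [List.mem_range] at hi
      rw [List.getD_eq_getElem?_getD, List.getElem?_map, List.getElem?_range hi]
      split_ifs with h1 h2
      · simp [pvContrib, h1]
      · rw [pv_foldl_mul]
        simp [pvContrib, h2]
      · simp only [PySem.List.pyGetD_natCast, List.getD_eq_getElem?_getD] at h1 h2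
        simp [pvContrib, h1, h2]

-- ===== VERDICT (by name: the statement is the Claim_ definition above) =====
theorem part_1_spec : Claim_equal_part_1 := by
  intro data _ _
  unfold Spec_part_1 part_1 part_1_alt
  exact pv_core _ _
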